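-- pv_equiv track=rewrite | github.com/ProjectRio/ProjectRio-web | app/util.py | validate_gecko_code
-- ===== SOURCE A (Python) =====
-- import string
--
-- def validate_gecko_code(in_str):
--   idx = 0
--   for char in in_str:
--     if idx == 17:
--       if char != '\n':
--         return False
--       idx = 0
--     elif idx == 8:
--       if char != ' ':
--         return False
--       idx+=1
--     elif idx <= 16:
--       if char not in string.hexdigits:
--         return False
--       idx+=1
--   #After the for loop
--   if (idx != 0): #Loop ended in the middle of a line
--     return False
--   return True
-- ===== SOURCE B (Python) =====
-- import string
--
-- def validate_gecko_code(in_str):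
--     lines = in_str.split('\n')
--     if lines[-1] != '':
--         return False
--     return all(
--         len(line) == 17 and line[8] == ' '
--         and all(c in string.hexdigits for c in line[:8])
--         and all(c in string.hexdigits for c in line[9:])
--         for line in lines[:-1])
-- ===== Notes on version B (the rewrite author's own statement) =====
-- stated objective: idiomatic
-- what changed: Instead of A's per-character counter state machine with early returns, B splits the input on newlines, requires the split's last piece to be empty (the trailing-newline rule), and validates each complete line wholesale: length 17, a space at index 8, hex digits in the two 8-character halves.
import Mathlib
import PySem

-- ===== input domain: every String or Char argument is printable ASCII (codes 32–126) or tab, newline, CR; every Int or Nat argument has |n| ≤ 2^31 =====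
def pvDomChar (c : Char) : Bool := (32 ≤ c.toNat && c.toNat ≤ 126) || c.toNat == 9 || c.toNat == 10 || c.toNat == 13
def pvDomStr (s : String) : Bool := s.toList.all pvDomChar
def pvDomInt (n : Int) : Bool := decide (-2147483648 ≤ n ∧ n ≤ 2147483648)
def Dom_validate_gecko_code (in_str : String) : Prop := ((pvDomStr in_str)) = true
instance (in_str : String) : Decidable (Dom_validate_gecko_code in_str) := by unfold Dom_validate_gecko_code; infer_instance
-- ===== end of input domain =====

-- B replaces A's per-character idx state machine by a line-based check: split the
-- input on '\n', require the trailing piece to be empty, and validate each complete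
-- line wholesale (length 17, space at index 8, hex digits in the two halves).

-- string.hexdigits
def pvHexdigits : List Char := "0123456789abcdefABCDEF".toList

-- ===== PORT A =====
-- the for-loop with early returns, carrying Python's idx
def pvLoopA : List Char → Int → Bool
  | [], idx => if idx != 0 then false else true
  | c :: cs, idx =>
    if idx == 17 then
      (if c != '\n' then false else pvLoopA cs 0)
    else if idx == 8 then
      (if c != ' ' then false else pvLoopA cs (idx + 1))
    else if idx ≤ 16 then
      (if !(pvHexdigits.contains c) then false else pvLoopA cs (idx + 1))
    else pvLoopA cs idx

def validate_gecko_code (in_str : String) : Bool := pvLoopA in_str.toList 0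

-- ===== PORT B =====
-- Source B's per-line test: len(line)==17 and line[8]==' ' and hex in line[:8] and line[9:]
def pvLineOk (l : List Char) : Bool :=
  decide (l.length = 17) && (PySem.List.pyGet? l 8 == some ' ')
    && (PySem.List.slice l none (some 8)).all (fun c => pvHexdigits.contains c)
    && (PySem.List.slice l (some 9) none).all (fun c => pvHexdigits.contains c)

-- if lines[-1] != '': return False; return all(... for line in lines[:-1])
def pvCheckSplit (lines : List (List Char)) : Bool :=
  if !(PySem.List.pyGet? lines (-1) == some ([] : List Char)) then false
  else (PySem.List.slice lines none (some (-1))).all pvLineOk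

-- lines = in_str.split('\n')
def validate_gecko_code_alt (in_str : String) : Bool :=
  pvCheckSplit (PySem.Chars.splitOn in_str.toList ['\n'])

-- ===== PRECONDITION & SPEC =====
def Spec_validate_gecko_code (in_str : String) (out : Bool) : Prop := out = validate_gecko_code_alt in_str
instance (in_str : String) (out : Bool) : Decidable (Spec_validate_gecko_code in_str out) := by unfold Spec_validate_gecko_code; infer_instance

-- ===== CLAIM (what is proved, stated in full; the proofs are below) =====
def Claim_equal_validate_gecko_code : Prop := ∀ (in_str : String), Dom_validate_gecko_code in_str → Spec_validate_gecko_code in_str (validate_gecko_code in_str)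

-- ===== LEMMAS AND PROOFS =====

-- clean recursive model of str.split('\n')
def pvSplitNl (pre : List Char) : List Char → List (List Char)
  | [] => [pre]
  | c :: cs => if c = '\n' then pre :: pvSplitNl [] cs else pvSplitNl (pre ++ [c]) cs

lemma pvSplitNl_ne_nil (pre cs) : pvSplitNl pre cs ≠ [] := by
  induction cs generalizing pre with
  | nil => simp [pvSplitNl]
  | cons c cs ih =>
    by_cases h : c = '\n' <;> simp [pvSplitNl, h, ih]

lemma pvSplitOn_go_eq : ∀ (fuel : Nat) (l cur : List Char) (acc : List (List Char)),
    l.length < fuel →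
    PySem.Chars.splitOn.go ['\n'] fuel l cur acc = acc.reverse ++ pvSplitNl cur.reverse l := by
  intro fuel
  induction fuel with
  | zero => intro l cur acc h; omega
  | succ n ih =>
    intro l cur acc h
    cases l with
    | nil => simp [PySem.Chars.splitOn.go, pvSplitNl]
    | cons c rest =>
      by_cases hc : c = '\n'
      · subst hc
        have : PySem.Chars.splitOn.go ['\n'] (n+1) ('\n' :: rest) cur acc
            = PySem.Chars.splitOn.go ['\n'] n rest [] (cur.reverse :: acc) := by
          simp [PySem.Chars.splitOn.go, List.isPrefixOf]
        rw [this, ih rest [] (cur.reverse :: acc) (by simp at h ⊢; omega)]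
        simp [pvSplitNl]
      · have : PySem.Chars.splitOn.go ['\n'] (n+1) (c :: rest) cur acc
            = PySem.Chars.splitOn.go ['\n'] n rest (c :: cur) acc := by
          simp [PySem.Chars.splitOn.go, List.isPrefixOf, Ne.symm hc]
        rw [this, ih rest (c :: cur) acc (by simp at h ⊢; omega)]
        simp [pvSplitNl, hc]

lemma pvSplitOn_nl (cs : List Char) : PySem.Chars.splitOn cs ['\n'] = pvSplitNl [] cs := by
  have := pvSplitOn_go_eq (cs.length + 1) cs [] [] (by omega)
  simpa [PySem.Chars.splitOn] using this

-- B's value expressed on the list of lines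
def pvBval (L : List (List Char)) : Bool :=
  (L.getLast? == some ([] : List Char)) && L.dropLast.all pvLineOk

lemma pvBval_cons (l : List Char) (M : List (List Char)) (h : M ≠ []) :
    pvBval (l :: M) = (pvLineOk l && pvBval M) := by
  cases M with
  | nil => exact absurd rfl h
  | cons m M' =>
    simp [pvBval, List.getLast?_cons_cons, Bool.and_assoc, Bool.and_comm]

lemma pvBval_single (pre : List Char) : pvBval [pre] = (pre == ([] : List Char)) := by
  simp [pvBval]

-- the per-position requirement
def pvPosOk (i : Nat) (c : Char) : Bool := if i = 8 then c == ' ' else pvHexdigits.contains c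

def pvPreOkP (pre : List Char) : Prop := ∀ i (h : i < pre.length), pvPosOk i pre[i] = true

lemma pvSlice_take8 (l : List Char) : PySem.List.slice l none (some 8) = l.take 8 := by
  have h : ((8 : Int)).toNat = 8 := rfl
  rw [PySem.List.slice_to l (by norm_num), h]

lemma pvSlice_drop9 (l : List Char) : PySem.List.slice l (some 9) none = l.drop 9 := by
  have h : ((9 : Int)).toNat = 9 := rfl
  rw [PySem.List.slice_from l (by norm_num), h]

lemma pvLineOk_iff (l : List Char) : pvLineOk l = true ↔ (l.length = 17 ∧ pvPreOkP l) := by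
  unfold pvLineOk
  rw [pvSlice_take8, pvSlice_drop9]
  constructor
  · rintro h
    simp only [Bool.and_eq_true, decide_eq_true_eq, beq_iff_eq, List.all_eq_true] at h
    obtain ⟨⟨⟨hlen, h8⟩, htake⟩, hdrop⟩ := h
    refine ⟨hlen, ?_⟩
    intro i hi
    unfold pvPosOk
    by_cases hi8 : i = 8
    · subst hi8
      have hcast : ((8 : Int)) = (((8 : Nat)) : Int) := by norm_num
      rw [hcast, PySem.List.pyGet?_natCast] at h8
      rw [List.getElem?_eq_getElem (show (8 : Nat) < l.length by omega)] at h8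
      have hval : l[8] = ' ' := Option.some.inj h8
      simp [hval]
    · rw [if_neg hi8]
      by_cases hlt : i < 8
      · have hmem : l[i] ∈ l.take 8 := by
          have hi' : i < (l.take 8).length := by simp [List.length_take]; omega
          have h1 : (l.take 8)[i]'hi' = l[i] := List.getElem_take
          rw [← h1]; exact List.getElem_mem _
        exact htake _ hmem
      · have h9 : 9 ≤ i := by omega
        have h1 : (l.drop 9)[i - 9]? = some (l[i]'hi) := by
          rw [List.getElem?_drop]
          have e : 9 + (i - 9) = i := by omega
          rw [e]
          exact List.getElem?_eq_getElem hi
        exact hdrop _ (List.mem_of_getElem? h1)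
  · rintro ⟨hlen, hpos⟩
    simp only [Bool.and_eq_true, decide_eq_true_eq, beq_iff_eq, List.all_eq_true]
    refine ⟨⟨⟨hlen, ?_⟩, ?_⟩, ?_⟩
    · have h8 := hpos 8 (by omega)
      rw [pvPosOk, if_pos rfl] at h8
      have hval : l[8] = ' ' := by simpa using h8
      have hcast : ((8 : Int)) = (((8 : Nat)) : Int) := by norm_num
      rw [hcast, PySem.List.pyGet?_natCast,
        List.getElem?_eq_getElem (show (8 : Nat) < l.length by omega), hval]
    · intro c hc
      obtain ⟨i, hi, rfl⟩ := List.mem_iff_getElem.mp hc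
      have hi8 : i < 8 := by simp [List.length_take] at hi; omega
      have := hpos i (by omega)
      rw [pvPosOk, if_neg (by omega)] at this
      simpa [List.getElem_take] using this
    · intro c hc
      obtain ⟨i, hi, rfl⟩ := List.mem_iff_getElem.mp hc
      have hi' : 9 + i < l.length := by simp [List.length_drop] at hi; omega
      have := hpos (9 + i) hi'
      rw [pvPosOk, if_neg (by omega)] at this
      simpa [List.getElem_drop] using this

lemma pvPreOkP_nil : pvPreOkP [] := by intro i h; simp at h

lemma pvPreOkP_of_append (pre : List Char) (c : Char) (h : pvPreOkP (pre ++ [c])) : pvPreOkP pre := by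
  intro i hi
  have := h i (by simp; omega)
  rwa [List.getElem_append_left hi] at this

lemma pvPreOkP_append (pre : List Char) (c : Char) (h : pvPreOkP pre)
    (hc : pvPosOk pre.length c = true) : pvPreOkP (pre ++ [c]) := by
  intro i hi
  simp only [List.length_append, List.length_cons, List.length_nil] at hi
  by_cases hlt : i < pre.length
  · rw [List.getElem_append_left hlt]; exact h i hlt
  · have : i = pre.length := by omega
    subst this
    simpa [List.getElem_append_right (le_refl pre.length)] using hc

-- a prefix that can no longer be completed to a valid line makes B reject
lemma pvBval_bad : ∀ (cs pre : List Char), ¬ (pre.length ≤ 17 ∧ pvPreOkP pre) →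
    pvBval (pvSplitNl pre cs) = false := by
  intro cs
  induction cs with
  | nil =>
    intro pre h
    have hne : pre ≠ [] := by
      rintro rfl; exact h ⟨by simp, pvPreOkP_nil⟩
    rw [pvSplitNl, pvBval_single]
    simpa using hne
  | cons c cs ih =>
    intro pre h
    by_cases hc : c = '\n'
    · subst hc
      rw [pvSplitNl, if_pos rfl, pvBval_cons _ _ (pvSplitNl_ne_nil _ _)]
      have : pvLineOk pre = false := by
        rw [Bool.eq_false_iff]
        intro hOk
        obtain ⟨hlen, hpos⟩ := (pvLineOk_iff pre).mp hOk
        exact h ⟨by omega, hpos⟩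
      simp [this]
    · rw [pvSplitNl, if_neg hc]
      apply ih
      rintro ⟨hlen, hpos⟩
      refine h ⟨?_, pvPreOkP_of_append pre c hpos⟩
      simp at hlen; omega

-- cast helpers for A's Int-valued idx
lemma pvBeq17 (n : Nat) : (((n : Int)) == (17 : Int)) = decide (n = 17) := by
  by_cases h : n = 17
  · subst h; simp
  · have h2 : ((n : Int) ≠ 17) := by exact_mod_cast h
    simp [h, h2]

lemma pvBeq8 (n : Nat) : (((n : Int)) == (8 : Int)) = decide (n = 8) := by
  by_cases h : n = 8
  · subst h; simp
  · have h2 : ((n : Int) ≠ 8) := by exact_mod_cast h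
    simp [h, h2]

lemma pvLineOk_false_short (pre : List Char) (h : pre.length ≠ 17) : pvLineOk pre = false := by
  rw [Bool.eq_false_iff]
  intro hOk
  exact h ((pvLineOk_iff pre).mp hOk).1

-- MAIN INVARIANT: A's loop from a valid partial line = B's verdict on the remaining split
lemma pvMain : ∀ (cs pre : List Char), pre.length ≤ 17 → pvPreOkP pre →
    pvLoopA cs (pre.length : Int) = pvBval (pvSplitNl pre cs) := by
  intro cs
  induction cs with
  | nil =>
    intro pre hlen hpos
    rw [pvSplitNl, pvBval_single, pvLoopA]
    by_cases h0 : pre = []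
    · subst h0; simp
    · have hb : (((pre.length : Nat) : Int) != 0) = true := by
        rw [bne_iff_ne]
        have : pre.length ≠ 0 := by simpa using h0
        exact_mod_cast this
      rw [hb, if_pos rfl]
      simpa using h0
  | cons c cs ih =>
    intro pre hlen hpos
    rw [pvLoopA, pvBeq17]
    by_cases h17 : pre.length = 17
    · -- end of a full line: A demands '\n'
      rw [decide_eq_true h17, if_pos rfl]
      by_cases hc : c = '\n'
      · subst hc
        rw [pvSplitNl, if_pos rfl, pvBval_cons _ _ (pvSplitNl_ne_nil _ _)]
        have hOk : pvLineOk pre = true := (pvLineOk_iff pre).mpr ⟨h17, hpos⟩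
        have hI := ih [] (by simp) pvPreOkP_nil
        simp only [List.length_nil, Nat.cast_zero] at hI
        simp [hOk, hI]
      · rw [if_pos (by simpa using hc)]
        rw [pvSplitNl, if_neg hc, eq_comm, pvBval_bad]
        rintro ⟨hl, _⟩
        simp [h17] at hl
    · have hle16 : pre.length ≤ 16 := by omega
      rw [decide_eq_false h17, if_neg (by simp), pvBeq8]
      by_cases h8 : pre.length = 8
      · rw [decide_eq_true h8, if_pos rfl]
        by_cases hc : c = ' '
        · subst hc
          rw [if_neg (by simp)]
          have hpos' : pvPreOkP (pre ++ [' ']) :=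
            pvPreOkP_append pre ' ' hpos (by simp [pvPosOk, h8])
          have hI := ih (pre ++ [' ']) (by simp; omega) hpos'
          simp only [List.length_append, List.length_cons, List.length_nil] at hI
          rw [pvSplitNl, if_neg (by decide), ← hI]
          norm_cast
        · rw [if_pos (by simpa using hc)]
          by_cases hnl : c = '\n'
          · subst hnl
            rw [pvSplitNl, if_pos rfl, pvBval_cons _ _ (pvSplitNl_ne_nil _ _)]
            simp [pvLineOk_false_short pre (by omega)]
          · rw [pvSplitNl, if_neg hnl, eq_comm, pvBval_bad]
            rintro ⟨_, hposBad⟩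
            have hb := hposBad pre.length (by simp)
            rw [pvPosOk, if_pos h8] at hb
            have hv : (pre ++ [c])[pre.length] = ' ' := by simpa using hb
            rw [List.getElem_append_right (le_refl pre.length)] at hv
            simp at hv
            exact hc hv
      · rw [decide_eq_false h8, if_neg (by simp),
          if_pos (show ((pre.length : Nat) : Int) ≤ 16 by exact_mod_cast hle16)]
        by_cases hhex : pvHexdigits.contains c = true
        · rw [hhex]
          simp only [Bool.not_true, Bool.false_eq_true, if_false]
          have hnl : c ≠ '\n' := by
            intro hcEq; subst hcEq; revert hhex; decide
          have hpos' : pvPreOkP (pre ++ [c]) :=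
            pvPreOkP_append pre c hpos (by rw [pvPosOk, if_neg h8]; exact hhex)
          have hI := ih (pre ++ [c]) (by simp; omega) hpos'
          simp only [List.length_append, List.length_cons, List.length_nil] at hI
          rw [pvSplitNl, if_neg hnl, ← hI]
          norm_cast
        · rw [Bool.not_eq_true] at hhex
          rw [hhex]
          simp only [Bool.not_false, if_true]
          by_cases hnl : c = '\n'
          · subst hnl
            rw [pvSplitNl, if_pos rfl, pvBval_cons _ _ (pvSplitNl_ne_nil _ _)]
            simp [pvLineOk_false_short pre (by omega)]
          · rw [pvSplitNl, if_neg hnl, eq_comm, pvBval_bad]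
            rintro ⟨_, hposBad⟩
            have hb := hposBad pre.length (by simp)
            rw [pvPosOk, if_neg h8] at hb
            have hv : pvHexdigits.contains ((pre ++ [c])[pre.length]) = true := hb
            rw [List.getElem_append_right (le_refl pre.length)] at hv
            simp only [Nat.sub_self, List.getElem_cons_zero] at hv
            rw [hhex] at hv
            exact Bool.false_ne_true hv

lemma pvGet_last (a : List Char) (M : List (List Char)) :
    PySem.List.pyGet? (a :: M) (-1) = (a :: M).getLast? := by
  simp [PySem.List.pyGet?, PySem.List.pyIdx?, List.getLast?_eq_getElem?]

lemma pvSlice_dropLast (a : List Char) (M : List (List Char)) :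
    PySem.List.slice (a :: M) none (some (-1)) = (a :: M).dropLast := by
  simp [PySem.List.slice, PySem.List.clampIdx, List.dropLast_eq_take]
  rw [if_neg (by omega : ¬ (((M.length : Nat) : Int) < 0))]
  omega

lemma pvCheckSplit_eq (L : List (List Char)) (h : L ≠ []) : pvCheckSplit L = pvBval L := by
  cases L with
  | nil => exact absurd rfl h
  | cons a M =>
    unfold pvCheckSplit pvBval
    rw [pvGet_last, pvSlice_dropLast]
    cases hb : ((a :: M).getLast? == some ([] : List Char)) <;> simp_all

-- bridge: B's port computes pvBval of the split
lemma pvAlt_eq (s : String) : validate_gecko_code_alt s = pvBval (pvSplitNl [] s.toList) := by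
  unfold validate_gecko_code_alt
  rw [pvSplitOn_nl, pvCheckSplit_eq _ (pvSplitNl_ne_nil _ _)]

-- ===== VERDICT (by name: the statement is the Claim_ definition above) =====
theorem validate_gecko_code_spec : Claim_equal_validate_gecko_code := by
  intro s _
  unfold Spec_validate_gecko_code validate_gecko_code
  rw [pvAlt_eq]
  have := pvMain s.toList [] (by simp) pvPreOkP_nil
  simpa using this
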